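-- pv_equiv track=rewrite | github.com/jlb8dh-tech/AI-Safety-Agent | agent/pipelines/standards/__init__.py | _categorize_standard
-- ===== SOURCE A (Python) =====
-- from typing import Dict, List, Optional, Set, Any, Union
--
-- def _categorize_standard(keywords: Set[str]) -> Set[str]:
--     """Categorize standard based on keywords"""
--     categories = set()
--
--     # Define category mappings
--     category_mappings = {
--         "privacy": {"privacy", "data", "personal", "gdpr", "ccpa"},
--         "security": {"security", "cyber", "encryption", "authentication"},
--         "financial": {"financial", "banking", "payment", "fintech"},
--         "healthcare": {"health", "medical", "hipaa", "patient"},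
--         "environmental": {"environment", "climate", "carbon", "sustainability"},
--         "labor": {"employment", "labor", "workplace", "safety"},
--         "technology": {"technology", "software", "ai", "algorithm"}
--     }
--
--     for category, category_keywords in category_mappings.items():
--         if keywords.intersection(category_keywords):
--             categories.add(category)
--
--     return categories
-- ===== SOURCE B (Python) =====
-- # B: one pass over the input with a static inverted keyword->category index,
-- # instead of intersecting the input with each category's keyword set.
--
-- _CATEGORY_OF = {
--     "privacy": "privacy", "data": "privacy", "personal": "privacy",
--     "gdpr": "privacy", "ccpa": "privacy",
--     "security": "security", "cyber": "security", "encryption": "security",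
--     "authentication": "security",
--     "financial": "financial", "banking": "financial", "payment": "financial",
--     "fintech": "financial",
--     "health": "healthcare", "medical": "healthcare", "hipaa": "healthcare",
--     "patient": "healthcare",
--     "environment": "environmental", "climate": "environmental",
--     "carbon": "environmental", "sustainability": "environmental",
--     "employment": "labor", "labor": "labor", "workplace": "labor",
--     "safety": "labor",
--     "technology": "technology", "software": "technology", "ai": "technology",
--     "algorithm": "technology",
-- }
--
-- _CATEGORIES = ("privacy", "security", "financial", "healthcare",
--                "environmental", "labor", "technology")
--
--
-- def _categorize_standard(keywords):
--     """Categorize standard based on keywords"""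
--     hits = set()
--     for k in keywords:
--         c = _CATEGORY_OF.get(k)
--         if c is not None:
--             hits.add(c)
--     return {c for c in _CATEGORIES if c in hits}
-- ===== Notes on version B (the rewrite author's own statement) =====
-- stated objective: idiomatic
-- what changed: B replaces the loop over the seven categories with per-category set intersections by a single pass over the input keywords through a static inverted keyword-to-category dict (well-defined since the seven keyword sets are disjoint), collecting hit categories into a set.
import Mathlib
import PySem

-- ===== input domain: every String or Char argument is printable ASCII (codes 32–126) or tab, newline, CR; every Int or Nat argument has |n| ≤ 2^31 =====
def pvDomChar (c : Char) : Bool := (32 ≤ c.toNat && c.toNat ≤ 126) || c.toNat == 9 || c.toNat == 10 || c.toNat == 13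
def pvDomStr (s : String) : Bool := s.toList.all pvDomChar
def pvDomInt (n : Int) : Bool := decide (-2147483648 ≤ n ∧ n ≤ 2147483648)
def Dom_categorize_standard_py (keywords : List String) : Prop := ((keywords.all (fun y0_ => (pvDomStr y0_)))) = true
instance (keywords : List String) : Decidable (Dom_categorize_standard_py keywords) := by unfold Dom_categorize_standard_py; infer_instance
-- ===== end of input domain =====

-- B replaces A's loop over the 7 categories (intersecting the input with each category's
-- keyword set) by one pass over the input keywords through a static inverted dict (idiomatic).
-- Both return Python sets; they are equal as sets, and the ports produce identical lists.

-- ===== PORT A =====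
-- the literal dict of category -> keyword set, in insertion order
def pvMappings : List (String × List String) :=
  [("privacy", ["privacy", "data", "personal", "gdpr", "ccpa"]),
   ("security", ["security", "cyber", "encryption", "authentication"]),
   ("financial", ["financial", "banking", "payment", "fintech"]),
   ("healthcare", ["health", "medical", "hipaa", "patient"]),
   ("environmental", ["environment", "climate", "carbon", "sustainability"]),
   ("labor", ["employment", "labor", "workplace", "safety"]),
   ("technology", ["technology", "software", "ai", "algorithm"])]

def categorize_standard_py (keywords : List String) : List String :=
  pvMappings.foldl
    (fun categories p =>
      if PySem.Set.inter keywords p.2 ≠ [] then PySem.Set.add categories p.1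
      else categories)
    PySem.Set.empty

-- ===== PORT B =====
-- static inverted index keyword -> category (Source B's _CATEGORY_OF)
def pvCategoryOf : PySem.Dict String String :=
  PySem.Dict.ofList
    [("privacy", "privacy"), ("data", "privacy"), ("personal", "privacy"),
     ("gdpr", "privacy"), ("ccpa", "privacy"),
     ("security", "security"), ("cyber", "security"), ("encryption", "security"),
     ("authentication", "security"),
     ("financial", "financial"), ("banking", "financial"), ("payment", "financial"),
     ("fintech", "financial"),
     ("health", "healthcare"), ("medical", "healthcare"), ("hipaa", "healthcare"),
     ("patient", "healthcare"),
     ("environment", "environmental"), ("climate", "environmental"),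
     ("carbon", "environmental"), ("sustainability", "environmental"),
     ("employment", "labor"), ("labor", "labor"), ("workplace", "labor"),
     ("safety", "labor"),
     ("technology", "technology"), ("software", "technology"), ("ai", "technology"),
     ("algorithm", "technology")]

def pvCategories : List String :=
  ["privacy", "security", "financial", "healthcare", "environmental", "labor", "technology"]

def categorize_standard_py_alt (keywords : List String) : List String :=
  let hits : PySem.Set String :=
    keywords.foldl
      (fun s k =>
        match pvCategoryOf.get? k with
        | some c => PySem.Set.add s c
        | none => s)
      PySem.Set.empty
  PySem.Set.ofList (pvCategories.filter (fun c => hits.contains c))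

-- ===== PRECONDITION & SPEC =====
def Spec_categorize_standard_py (keywords : List String) (out : List String) : Prop := out = categorize_standard_py_alt keywords
instance (keywords : List String) (out : List String) : Decidable (Spec_categorize_standard_py keywords out) := by unfold Spec_categorize_standard_py; infer_instance

-- ===== CLAIM (what is proved, stated in full; the proofs are below) =====
def Claim_equal_categorize_standard_py : Prop := ∀ (keywords : List String), Dom_categorize_standard_py keywords → Spec_categorize_standard_py keywords (categorize_standard_py keywords)

-- ===== LEMMAS AND PROOFS =====

-- A's truthiness test 'keywords.intersection(t)' is nonempty iff some keyword is in t
theorem pv_inter_ne (keywords t : List String) :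
    (PySem.Set.inter keywords t ≠ []) ↔ keywords.any (fun k => t.contains k) = true := by
  simp [PySem.Set.inter, PySem.Set.contains, List.filter_eq_nil_iff, List.any_eq_true]

-- membership in B's accumulated hit set, as an 'any' over the input keywords
theorem pv_hits_contains (l : List String) (s : PySem.Set String) (c : String) :
    List.contains (l.foldl
       (fun s k =>
         match pvCategoryOf.get? k with
         | some c => PySem.Set.add s c
         | none => s) s) c =
      (List.contains s c || l.any (fun k => pvCategoryOf.get? k == some c)) := by
  induction l generalizing s with
  | nil => simp
  | cons k t ih =>
    simp only [List.foldl_cons, List.any_cons, ih]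
    cases h : pvCategoryOf.get? k with
    | none => simp
    | some c' =>
      simp only [PySem.Set.add, PySem.Set.contains]
      by_cases hc : c' = c
      · subst hc; split <;> simp_all
      · split <;> simp_all [beq_eq_false_iff_ne.mpr hc, Ne.symm hc]

-- the inverted index maps k to category c exactly when k is in c's keyword set
set_option maxHeartbeats 2000000 in
theorem pv_lookup (c : String) (t : List String) (h : (c, t) ∈ pvMappings) (k : String) :
    (pvCategoryOf.get? k == some c) = t.contains k := by
  by_cases hk : k ∈ (["privacy", "data", "personal", "gdpr", "ccpa", "security", "cyber", "encryption", "authentication", "financial", "banking", "payment", "fintech", "health", "medical", "hipaa", "patient", "environment", "climate", "carbon", "sustainability", "employment", "labor", "workplace", "safety", "technology", "software", "ai", "algorithm"] : List String)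
  · fin_cases hk <;> fin_cases h <;> decide
  · have hsub : ∀ x ∈ t, x ∈ (["privacy", "data", "personal", "gdpr", "ccpa", "security", "cyber", "encryption", "authentication", "financial", "banking", "payment", "fintech", "health", "medical", "hipaa", "patient", "environment", "climate", "carbon", "sustainability", "employment", "labor", "workplace", "safety", "technology", "software", "ai", "algorithm"] : List String) := by
      fin_cases h <;> decide
    have h0 : pvCategoryOf.get? k = none := by
      unfold pvCategoryOf
      simp only [PySem.Dict.get?]
      rw [List.find?_eq_none.mpr]
      · rfl
      · intro p hp
        fin_cases hp <;>
          · intro hE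
            rw [← beq_iff_eq.mp hE] at hk
            exact hk (by decide)
    have h1 : t.contains k = false := by
      rw [← Bool.not_eq_true]
      intro hE
      exact hk (hsub k (by simpa using hE))
    rw [h0, h1]
    rfl

-- ===== VERDICT (by name: the statement is the Claim_ definition above) =====
theorem categorize_standard_py_spec : Claim_equal_categorize_standard_py := by
  intro keywords _
  unfold Spec_categorize_standard_py categorize_standard_py categorize_standard_py_alt
  have e := fun c t h => PySem.List.any_congr_mem
    (l := keywords) (f := fun k => pvCategoryOf.get? k == some c)
    (g := fun k => t.contains k) (fun k _ => pv_lookup c t h k)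
  simp only [pvMappings, pvCategories, List.foldl, List.filter_cons, List.filter_nil]
  simp only [pv_inter_ne, PySem.Set.contains]
  simp only [pv_hits_contains]
  rw [e "privacy" ["privacy", "data", "personal", "gdpr", "ccpa"] (by decide),
    e "security" ["security", "cyber", "encryption", "authentication"] (by decide),
    e "financial" ["financial", "banking", "payment", "fintech"] (by decide),
    e "healthcare" ["health", "medical", "hipaa", "patient"] (by decide),
    e "environmental" ["environment", "climate", "carbon", "sustainability"] (by decide),
    e "labor" ["employment", "labor", "workplace", "safety"] (by decide),
    e "technology" ["technology", "software", "ai", "algorithm"] (by decide)]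
  generalize keywords.any (fun k => (["privacy", "data", "personal", "gdpr", "ccpa"] : List String).contains k) = b1
  generalize keywords.any (fun k => (["security", "cyber", "encryption", "authentication"] : List String).contains k) = b2
  generalize keywords.any (fun k => (["financial", "banking", "payment", "fintech"] : List String).contains k) = b3
  generalize keywords.any (fun k => (["health", "medical", "hipaa", "patient"] : List String).contains k) = b4
  generalize keywords.any (fun k => (["environment", "climate", "carbon", "sustainability"] : List String).contains k) = b5
  generalize keywords.any (fun k => (["employment", "labor", "workplace", "safety"] : List String).contains k) = b6
  generalize keywords.any (fun k => (["technology", "software", "ai", "algorithm"] : List String).contains k) = b7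
  cases b1 <;> cases b2 <;> cases b3 <;> cases b4 <;> cases b5 <;> cases b6 <;> cases b7 <;> rfl
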